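-- pv_equiv track=rewrite | github.com/koa800/meta-banner-maker | System/payment_metrics_sheet_sync.py | header_indexes_by_contains
-- ===== SOURCE A (Python) =====
-- from typing import Dict, Iterable, List, Optional
--
-- def normalize_text(value: object) -> str:
--     return str(value or "").strip()
--
-- def header_indexes_by_contains(headers: list[str], keywords: Iterable[str]) -> list[int]:
--     normalized_keywords = [normalize_text(keyword) for keyword in keywords if normalize_text(keyword)]
--     matches: list[int] = []
--     for index, header in enumerate(headers):
--         header_text = normalize_text(header)
--         if any(keyword in header_text for keyword in normalized_keywords):
--             matches.append(index)
--     return matches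
-- ===== SOURCE B (Python) =====
-- def normalize_text(value: object) -> str:
--     return str(value or "").strip()
--
-- def header_indexes_by_contains(headers, keywords):
--     # keyword-major traversal: collect matching indices in a set, sort at the end
--     normalized_keywords = [normalize_text(k) for k in keywords if normalize_text(k)]
--     normalized_headers = [normalize_text(h) for h in headers]
--     found = set()
--     for keyword in normalized_keywords:
--         for index, header_text in enumerate(normalized_headers):
--             if keyword in header_text:
--                 found.add(index)
--     return sorted(found)
-- ===== Notes on version B (the rewrite author's own statement) =====
-- stated objective: alternative
-- what changed: Traversal inverted to keyword-major over pre-normalized headers, maintaining a set of matching indices that is sorted at the end, instead of header-major order-preserving append guarded by any().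
import Mathlib
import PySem

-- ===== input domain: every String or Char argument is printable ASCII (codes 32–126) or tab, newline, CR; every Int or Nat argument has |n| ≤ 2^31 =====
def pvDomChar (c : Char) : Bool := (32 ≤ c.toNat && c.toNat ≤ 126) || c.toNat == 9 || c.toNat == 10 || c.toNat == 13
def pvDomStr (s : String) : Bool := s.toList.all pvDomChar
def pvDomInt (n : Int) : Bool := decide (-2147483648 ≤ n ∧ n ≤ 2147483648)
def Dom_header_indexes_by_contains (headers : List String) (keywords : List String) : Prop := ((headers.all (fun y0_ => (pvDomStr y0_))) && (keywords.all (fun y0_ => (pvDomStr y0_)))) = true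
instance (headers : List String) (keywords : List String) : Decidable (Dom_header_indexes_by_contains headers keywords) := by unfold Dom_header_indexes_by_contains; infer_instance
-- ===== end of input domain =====

-- B inverts the traversal: keyword-major over pre-normalized headers, maintaining a set of
-- matching indices that is sorted at the end (alternative decomposition; same output, same cost class).

-- ===== PORT A =====
-- normalize_text(value): on a str argument, `str(value or "")` is the string itself (or "" for ""),
-- so normalize_text is exactly .strip()
def normalize_text (value : String) : String := PySem.Str.strip value

def header_indexes_by_contains (headers : List String) (keywords : List String) : List Int :=
  let normalized_keywords :=
    keywords.filterMap (fun keyword =>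
      if normalize_text keyword ≠ "" then some (normalize_text keyword) else none)
  (PySem.List.enumerate headers).foldl
    (fun acc p =>
      let header_text := normalize_text p.2
      if normalized_keywords.any (fun keyword => PySem.Str.isIn keyword header_text) then
        acc ++ [p.1]
      else acc)
    []

-- ===== PORT B =====
def header_indexes_by_contains_alt (headers : List String) (keywords : List String) : List Int :=
  let normalized_keywords :=
    keywords.filterMap (fun k =>
      if normalize_text k ≠ "" then some (normalize_text k) else none)
  let normalized_headers := headers.map normalize_text
  let found : PySem.Set Int :=
    normalized_keywords.foldl
      (fun s keyword =>
        (PySem.List.enumerate normalized_headers).foldl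
          (fun s p => if PySem.Str.isIn keyword p.2 then PySem.Set.add s p.1 else s)
          s)
      PySem.Set.empty
  PySem.List.sorted found (fun x => x) false

-- ===== PRECONDITION & SPEC =====
def Spec_header_indexes_by_contains (headers : List String) (keywords : List String) (out : List Int) : Prop := out = header_indexes_by_contains_alt headers keywords
instance (headers : List String) (keywords : List String) (out : List Int) : Decidable (Spec_header_indexes_by_contains headers keywords out) := by unfold Spec_header_indexes_by_contains; infer_instance

-- ===== CLAIM (what is proved, stated in full; the proofs are below) =====
def Claim_equal_header_indexes_by_contains : Prop := ∀ (headers : List String) (keywords : List String), Dom_header_indexes_by_contains headers keywords → Spec_header_indexes_by_contains headers keywords (header_indexes_by_contains headers keywords)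

-- ===== LEMMAS AND PROOFS =====

-- enumerate commutes with map on the elements
theorem pv_enumerate_map {α β : Type} (f : α → β) (xs : List α) (s : Int) :
    PySem.List.enumerate (xs.map f) s = (PySem.List.enumerate xs s).map (fun p => (p.1, f p.2)) := by
  induction xs generalizing s with
  | nil => simp [PySem.List.enumerate_nil]
  | cons x xs ih => simp [PySem.List.enumerate_cons, ih]

-- A's loop appends exactly the filtered indices
theorem pv_A_foldl (nk : List String) (E : List (Int × String)) (acc : List Int) :
    E.foldl (fun acc p =>
        if nk.any (fun keyword => PySem.Str.isIn keyword (normalize_text p.2)) then acc ++ [p.1] else acc) acc =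
      acc ++ (E.filter (fun p => nk.any (fun keyword => PySem.Str.isIn keyword (normalize_text p.2)))).map (fun p => p.1) := by
  induction E generalizing acc with
  | nil => simp
  | cons q E ih =>
    rw [List.foldl_cons, List.filter_cons]
    by_cases h : nk.any (fun keyword => PySem.Str.isIn keyword (normalize_text q.2)) = true
    · rw [if_pos h, if_pos h, ih, List.map_cons]
      simp
    · rw [if_neg h, if_neg h, ih]

-- inner loop of B: membership
theorem pv_inner_mem (kw : String) (E : List (Int × String)) (s : PySem.Set Int) (x : Int) :
    x ∈ E.foldl (fun s p => if PySem.Str.isIn kw p.2 then PySem.Set.add s p.1 else s) s ↔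
      x ∈ s ∨ ∃ p ∈ E, PySem.Str.isIn kw p.2 = true ∧ x = p.1 := by
  induction E generalizing s with
  | nil => simp
  | cons q E ih =>
    rw [List.foldl_cons, ih, List.exists_mem_cons_iff]
    by_cases h : PySem.Str.isIn kw q.2 = true
    · rw [if_pos h, PySem.Set.mem_add]
      tauto
    · rw [if_neg h]
      tauto

-- inner loop of B: nodup is preserved
theorem pv_inner_nodup (kw : String) (E : List (Int × String)) (s : PySem.Set Int) (hs : s.Nodup) :
    (E.foldl (fun s p => if PySem.Str.isIn kw p.2 then PySem.Set.add s p.1 else s) s).Nodup := by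
  induction E generalizing s with
  | nil => exact hs
  | cons q E ih =>
    simp only [List.foldl_cons]
    split
    · exact ih _ (PySem.Set.nodup_add _ _ hs)
    · exact ih _ hs

-- outer loop of B: membership
theorem pv_outer_mem (nk : List String) (E : List (Int × String)) (s : PySem.Set Int) (x : Int) :
    x ∈ nk.foldl (fun s kw =>
        E.foldl (fun s p => if PySem.Str.isIn kw p.2 then PySem.Set.add s p.1 else s) s) s ↔
      x ∈ s ∨ ∃ kw ∈ nk, ∃ p ∈ E, PySem.Str.isIn kw p.2 = true ∧ x = p.1 := by
  induction nk generalizing s with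
  | nil => simp
  | cons kw nk ih =>
    simp only [List.foldl_cons, ih, pv_inner_mem]
    simp only [List.mem_cons]
    constructor
    · rintro (⟨h | h⟩ | h)
      · exact Or.inl h
      · exact Or.inr ⟨kw, Or.inl rfl, h⟩
      · obtain ⟨k, hk, h⟩ := h; exact Or.inr ⟨k, Or.inr hk, h⟩
    · rintro (h | ⟨k, hk | hk, h⟩)
      · exact Or.inl (Or.inl h)
      · exact Or.inl (Or.inr (hk ▸ h))
      · exact Or.inr ⟨k, hk, h⟩

-- outer loop of B: nodup
theorem pv_outer_nodup (nk : List String) (E : List (Int × String)) (s : PySem.Set Int) (hs : s.Nodup) :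
    (nk.foldl (fun s kw =>
        E.foldl (fun s p => if PySem.Str.isIn kw p.2 then PySem.Set.add s p.1 else s) s) s).Nodup := by
  induction nk generalizing s with
  | nil => exact hs
  | cons kw nk ih => exact ih _ (pv_inner_nodup kw E s hs)

-- ===== VERDICT (by name: the statement is the Claim_ definition above) =====
theorem header_indexes_by_contains_spec : Claim_equal_header_indexes_by_contains := by
  intro headers keywords _
  unfold Spec_header_indexes_by_contains header_indexes_by_contains header_indexes_by_contains_alt
  dsimp only
  set nk := keywords.filterMap (fun k =>
      if normalize_text k ≠ "" then some (normalize_text k) else none) with hnk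
  -- A's result is the filtered enumeration
  rw [pv_A_foldl]
  simp only [List.nil_append]
  set L := ((PySem.List.enumerate headers).filter
      (fun p => nk.any (fun keyword => PySem.Str.isIn keyword (normalize_text p.2)))).map
      (fun p => p.1) with hL
  set F := nk.foldl (fun s kw =>
      (PySem.List.enumerate (headers.map normalize_text)).foldl
        (fun s p => if PySem.Str.isIn kw p.2 then PySem.Set.add s p.1 else s) s)
      PySem.Set.empty with hF
  -- L is strictly increasing
  have hLlt : L.Pairwise (· < ·) := by
    rw [hL]
    exact List.Pairwise.map _ (fun a b h => h)
      ((PySem.List.pairwise_lt_enumerate headers 0).filter _)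
  -- same membership
  have hmem : ∀ x : Int, x ∈ L ↔ x ∈ F := by
    intro x
    rw [hL, hF, pv_outer_mem]
    simp only [PySem.Set.empty, List.not_mem_nil, false_or]
    rw [pv_enumerate_map]
    simp only [List.mem_map, List.mem_filter, List.any_eq_true]
    constructor
    · rintro ⟨p, ⟨hp, kw, hkw, hin⟩, rfl⟩
      exact ⟨kw, hkw, (p.1, normalize_text p.2), ⟨p, hp, rfl⟩, hin, rfl⟩
    · rintro ⟨kw, hkw, q, ⟨p, hp, rfl⟩, hin, rfl⟩
      exact ⟨p, ⟨hp, kw, hkw, hin⟩, rfl⟩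
  have hperm : L.Perm F := by
    refine (List.perm_ext_iff_of_nodup ?_ ?_).2 hmem
    · exact hLlt.nodup
    · exact pv_outer_nodup _ _ _ List.nodup_nil
  exact (PySem.List.sorted_eq_of_perm_of_pairwise_lt F L (fun x => x) hperm hLlt).symm
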